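-- pv_equiv track=rewrite | github.com/agussnb/Ejercicios_Progra1 | Stark/biblioteca_stark/funciones.py | buscar_debil
-- ===== SOURCE A (Python) =====
-- def buscar_debil(lista:list):
--     """
--     Listar Masculinos débiles. Recorrer la lista y determinar cuál es el superhéroe más débil de
--     género M, es decir, el que tenga la menor fuerza.
--     """
--     mas_debil = None
--     fuerza_minima = float('inf')
--
--     for superheroe in lista:
--         if superheroe['genero'] == 'M':
--             fuerza = int(superheroe['fuerza'])
--             if fuerza < fuerza_minima:
--                 fuerza_minima = fuerza
--                 mas_debil = superheroe
--
--     if mas_debil: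
--         return f"El superhéroe más débil es: {mas_debil['nombre']}, con fuerza {mas_debil['fuerza']}"
--     else:
--         return "No se encontraron superhéroes masculinos."
-- ===== SOURCE B (Python) =====
-- def buscar_debil(lista: list):
--     """Staged rewrite: filter the males, STABLY SORT them by int strength
--     (Timsort; stability makes sorted(...)[0] the FIRST minimal male, matching
--     the original strict-< first-min loop), then take the head."""
--     masculinos = [s for s in lista if s['genero'] == 'M']
--     ordenados = sorted(masculinos, key=lambda s: int(s['fuerza']))
--     if ordenados:
--         debil = ordenados[0]
--         return f"El superhéroe más débil es: {debil['nombre']}, con fuerza {debil['fuerza']}"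
--     return "No se encontraron superhéroes masculinos."
-- ===== Notes on version B (the rewrite author's own statement) =====
-- stated objective: alternative
-- what changed: Replaces the single-pass two-accumulator minimum loop by a staged pipeline: filter the males, stably sort them by int(fuerza), and take the head of the sorted list (stability makes sorted[0] the first minimal male, i.e. A's strict-< first-min).
import Mathlib
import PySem

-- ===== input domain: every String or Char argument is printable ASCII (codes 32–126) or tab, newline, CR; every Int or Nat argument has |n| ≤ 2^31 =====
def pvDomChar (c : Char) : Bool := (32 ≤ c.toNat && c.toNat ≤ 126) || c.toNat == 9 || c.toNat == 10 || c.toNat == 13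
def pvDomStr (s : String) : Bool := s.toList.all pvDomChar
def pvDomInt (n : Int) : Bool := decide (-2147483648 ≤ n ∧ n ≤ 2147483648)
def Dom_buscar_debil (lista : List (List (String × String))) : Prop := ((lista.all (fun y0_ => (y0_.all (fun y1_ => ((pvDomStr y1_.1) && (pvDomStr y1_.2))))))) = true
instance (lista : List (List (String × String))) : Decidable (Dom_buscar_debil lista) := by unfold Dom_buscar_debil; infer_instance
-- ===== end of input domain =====

-- B replaces A's single-pass two-accumulator minimum loop by filter + stable sort by strength + head (alternative decomposition; stability gives the same first-min).


-- shared dict-lookup helpers (Python d[k]; total via default, exact on Pre_ where the key is present)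
def pvGetD (sh : List (String × String)) (k : String) : String :=
  PySem.Dict.getD ⟨sh⟩ k ""
def pvKey (sh : List (String × String)) : Int :=
  (PySem.Int.ofStr? (pvGetD sh "fuerza")).getD 0

-- ===== PORT A =====
def buscar_debil (lista : List (List (String × String))) : String :=
  let st := lista.foldl
    (fun (acc : Option (List (String × String)) × Option Int) sh =>
      if pvGetD sh "genero" == "M" then
        let fuerza := pvKey sh
        match acc.2 with
        | none => (some sh, some fuerza)          -- fuerza < float('inf')
        | some fm => if fuerza < fm then (some sh, some fuerza) else acc
      else acc)
    (none, none)
  match st.1 with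
  | some m => "El superhéroe más débil es: " ++ pvGetD m "nombre" ++ ", con fuerza " ++ pvGetD m "fuerza"
  | none => "No se encontraron superhéroes masculinos."

-- ===== PORT B =====
def buscar_debil_alt (lista : List (List (String × String))) : String :=
  let masculinos := lista.filter (fun sh => pvGetD sh "genero" == "M")
  let ordenados := PySem.List.sorted masculinos pvKey
  match ordenados with
  | debil :: _ =>
      "El superhéroe más débil es: " ++ pvGetD debil "nombre" ++ ", con fuerza " ++ pvGetD debil "fuerza"
  | [] => "No se encontraron superhéroes masculinos."

-- ===== PRECONDITION & SPEC =====
-- Pre_ excludes (a) dicts with duplicate keys, where the assoc-list first-match reading of a Python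
-- dict is accidental, (b) entries missing 'genero', and males missing 'fuerza'/unparseable fuerza,
-- where A raises KeyError/ValueError, and (c) males missing 'nombre' — a closed-form
-- over-approximation of "the winner has a 'nombre'" (A raises KeyError when the winner lacks it;
-- on a non-winner male missing 'nombre' both programs still return the same value).
def Pre_buscar_debil (lista : List (List (String × String))) : Prop :=
  ∀ sh ∈ lista, (sh.map Prod.fst).Nodup ∧
    (PySem.Dict.get? (⟨sh⟩ : PySem.Dict String String) "genero").isSome = true ∧
    (pvGetD sh "genero" = "M" →
      ((PySem.Dict.get? (⟨sh⟩ : PySem.Dict String String) "fuerza").bind PySem.Int.ofStr?).isSome = true ∧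
      (PySem.Dict.get? (⟨sh⟩ : PySem.Dict String String) "nombre").isSome = true)
instance (lista : List (List (String × String))) : Decidable (Pre_buscar_debil lista) := by
  unfold Pre_buscar_debil; infer_instance
def pvWitness_buscar_debil : (List (List (String × String))) :=
  [[("genero", "M"), ("fuerza", "5"), ("nombre", "Ana")], [("genero", "F"), ("fuerza", "1")]]

def Spec_buscar_debil (lista : List (List (String × String))) (out : String) : Prop := out = buscar_debil_alt lista
instance (lista : List (List (String × String))) (out : String) : Decidable (Spec_buscar_debil lista out) := by unfold Spec_buscar_debil; infer_instance

-- ===== CLAIM =====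
def Claim_equal_buscar_debil : Prop := ∀ (lista : List (List (String × String))), Dom_buscar_debil lista → Pre_buscar_debil lista → Spec_buscar_debil lista (buscar_debil lista)

-- ===== LEMMAS AND PROOFS =====

-- the min?-style step (exactly the foldl step of PySem.List.min? at key pvKey)
def pvStepM (o : Option (List (String × String))) (sh : List (String × String)) :
    Option (List (String × String)) :=
  match o with
  | none => some sh
  | some m => if pvKey sh < pvKey m then some sh else some m

-- A's loop, started in a consistent state, computes the keyed first-min of the filtered list.
theorem pvLoopA_eq (xs : List (List (String × String))) (o : Option (List (String × String))) :
    xs.foldl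
      (fun (acc : Option (List (String × String)) × Option Int) sh =>
        if pvGetD sh "genero" == "M" then
          let fuerza := pvKey sh
          match acc.2 with
          | none => (some sh, some fuerza)
          | some fm => if fuerza < fm then (some sh, some fuerza) else acc
        else acc)
      (o, o.map pvKey)
    = (((xs.filter (fun sh => pvGetD sh "genero" == "M")).foldl pvStepM o),
       ((xs.filter (fun sh => pvGetD sh "genero" == "M")).foldl pvStepM o).map pvKey) := by
  induction xs generalizing o with
  | nil => simp
  | cons sh t ih =>
    by_cases h : pvGetD sh "genero" = "M"
    · cases o with
      | none =>
        simpa [List.foldl_cons, List.filter_cons, h, pvStepM] using ih (some sh)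
      | some m =>
        by_cases hlt : pvKey sh < pvKey m
        · simpa [List.foldl_cons, List.filter_cons, h, pvStepM, hlt] using ih (some sh)
        · simpa [List.foldl_cons, List.filter_cons, h, pvStepM, hlt] using ih (some m)
    · simpa [List.foldl_cons, List.filter_cons, h] using ih o

-- head of a stable key-< insertion: the incoming element wins only on strict decrease
theorem pvInsertBy_head (x : List (String × String)) (acc : List (List (String × String))) :
    (PySem.List.insertBy (fun a b => decide (pvKey a < pvKey b)) x acc).head? =
      pvStepM acc.head? x := by
  cases acc with
  | nil => rfl
  | cons m t =>
    by_cases h : pvKey x < pvKey m <;>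
      simp [PySem.List.insertBy, pvStepM, h]

-- head of the insertion-sort fold = the min? fold (stability: first minimal element)
theorem pvHead_foldl_insertBy (xs : List (List (String × String)))
    (acc : List (List (String × String))) :
    (xs.foldl (fun a x => PySem.List.insertBy (fun a b => decide (pvKey a < pvKey b)) x a) acc).head?
      = xs.foldl pvStepM acc.head? := by
  induction xs generalizing acc with
  | nil => rfl
  | cons x t ih =>
    rw [List.foldl_cons, List.foldl_cons, ih, pvInsertBy_head]

-- head of sorted(xs, key=pvKey) = first minimal element of xs under pvKey
theorem pvHead_sorted_eq_min (xs : List (List (String × String))) :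
    (PySem.List.sorted xs pvKey).head? = xs.foldl pvStepM none := by
  rw [PySem.List.sorted_eq_foldl_insertBy]
  simpa using pvHead_foldl_insertBy xs []

-- ===== VERDICT =====
theorem buscar_debil_spec : Claim_equal_buscar_debil := by
  intro lista _ _
  unfold Spec_buscar_debil buscar_debil buscar_debil_alt
  have h := pvLoopA_eq lista none
  simp only [Option.map_none] at h
  rw [h]
  have hh := pvHead_sorted_eq_min (lista.filter (fun sh => pvGetD sh "genero" == "M"))
  cases hs : PySem.List.sorted (lista.filter (fun sh => pvGetD sh "genero" == "M")) pvKey with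
  | nil =>
    rw [hs] at hh
    simp only [List.head?_nil] at hh
    rw [← hh]
    simp [hs]
  | cons d t =>
    rw [hs] at hh
    simp only [List.head?_cons] at hh
    rw [← hh]
    simp [hs]
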